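-- pv_equiv track=rewrite | github.com/felipeoes/gitupper-submissions | beecrowd/443091/Categoria/Ad-Hoc/22550817_1547_Guess_What.py | pesquisaNumeroSecreto
-- ===== SOURCE A (Python) =====
-- def closest(list, number):
--     aux = []
--     for valor in list:
--         aux.append(abs(number-valor))
--
--     return aux.index(min(aux)) + 1
--
-- def pesquisaNumeroSecreto(qtdeAlunos, numeroSecreto, vetor):
--     if(qtdeAlunos <= 10 and qtdeAlunos >= 4 and numeroSecreto <= 100 and numeroSecreto >= 1):
--         vetor = list(map(int, vetor))
--         posicaoAcerto = vetor[0]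
--         for i in range(len(vetor)):
--             if(vetor[i] == numeroSecreto):
--                 posicaoAcerto = i + 1  # adiciona 1 na posicao pois posicao 0 não é válido no contexto
--                 return posicaoAcerto
--         else:
--             # indiceMaisProximo = min(range(len(vetor)), key=lambda x: abs(x-numeroSecreto))
--             # indiceFinal = indiceMaisProximo - 1
--             # return indiceFinal
--             return closest(vetor, numeroSecreto)
-- ===== SOURCE B (Python) =====
-- def pesquisaNumeroSecreto(qtdeAlunos, numeroSecreto, vetor):
--     if not (4 <= qtdeAlunos <= 10 and 1 <= numeroSecreto <= 100):
--         return None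
--     best = None  # (distance, 1-based position)
--     pos = 1
--     for v in vetor:
--         d = abs(int(v) - numeroSecreto)
--         if best is None or d < best[0]:
--             best = (d, pos)
--         pos += 1
--     if best is None:
--         return None
--     return best[1]
-- ===== Notes on version B (the rewrite author's own statement) =====
-- stated objective: simpler
-- what changed: Replaced A's exact-match index scan plus the closest() helper (which builds a distance list, takes min, then list.index) by one pass that tracks the best (distance, position) pair, using that an exact match is just distance 0 and both tie-break on first occurrence.
import Mathlib
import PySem

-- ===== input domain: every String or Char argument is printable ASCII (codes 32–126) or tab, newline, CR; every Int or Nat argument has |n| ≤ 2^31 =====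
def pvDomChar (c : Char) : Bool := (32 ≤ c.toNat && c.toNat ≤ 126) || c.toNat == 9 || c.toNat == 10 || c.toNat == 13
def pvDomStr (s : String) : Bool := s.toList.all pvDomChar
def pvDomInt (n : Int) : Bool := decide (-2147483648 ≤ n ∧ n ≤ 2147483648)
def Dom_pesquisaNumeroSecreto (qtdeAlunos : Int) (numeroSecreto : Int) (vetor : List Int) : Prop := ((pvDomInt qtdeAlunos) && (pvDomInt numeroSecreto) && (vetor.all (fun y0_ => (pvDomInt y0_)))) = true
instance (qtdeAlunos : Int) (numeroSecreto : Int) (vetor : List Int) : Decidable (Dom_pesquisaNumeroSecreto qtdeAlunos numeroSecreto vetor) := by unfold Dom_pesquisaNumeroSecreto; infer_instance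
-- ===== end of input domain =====

-- B replaces A's four passes (exact-match scan, distance list build, min, index) and its
-- helper by one pass tracking (best distance, position); objective: simpler.


-- ===== PORT A =====
-- helper `closest(list, number)`: build aux = |number - v| for each v, then aux.index(min(aux)) + 1
def closestA (l : List Int) (number : Int) : Option Int :=
  let aux := l.map (fun valor => |number - valor|)
  match PySem.List.min? aux (fun x => x) with
  | none => none          -- min([]) raises ValueError (excluded by Pre_)
  | some m =>
    match PySem.List.index? aux m with
    | none => none        -- unreachable: min is a member
    | some i => some ((i : Int) + 1)

-- A's `for i in range(len(vetor)): if vetor[i] == numeroSecreto: return i + 1` scan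
def scanA (numeroSecreto : Int) : List Int → Option Nat
  | [] => none
  | v :: vs => if v = numeroSecreto then some 0 else (scanA numeroSecreto vs).map (· + 1)

def pesquisaNumeroSecreto (qtdeAlunos : Int) (numeroSecreto : Int) (vetor : List Int) : Option Int :=
  if qtdeAlunos ≤ 10 ∧ 4 ≤ qtdeAlunos ∧ numeroSecreto ≤ 100 ∧ 1 ≤ numeroSecreto then
    match vetor with
    | [] => none          -- `posicaoAcerto = vetor[0]` raises IndexError (excluded by Pre_)
    | _ :: _ =>
      match scanA numeroSecreto vetor with
      | some i => some ((i : Int) + 1)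
      | none => closestA vetor numeroSecreto
  else none

-- ===== PORT B =====
-- B's single loop over vetor carrying best = none | some (distance, 1-based position)
def bLoop (numeroSecreto : Int) : List Int → Int → Option (Int × Int) → Option (Int × Int)
  | [], _, best => best
  | v :: vs, pos, best =>
    let d := |v - numeroSecreto|
    let best' := match best with
      | none => some (d, pos)
      | some (bd, bp) => if d < bd then some (d, pos) else some (bd, bp)
    bLoop numeroSecreto vs (pos + 1) best'

def pesquisaNumeroSecreto_alt (qtdeAlunos : Int) (numeroSecreto : Int) (vetor : List Int) : Option Int :=
  if 4 ≤ qtdeAlunos ∧ qtdeAlunos ≤ 10 ∧ 1 ≤ numeroSecreto ∧ numeroSecreto ≤ 100 then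
    match bLoop numeroSecreto vetor 1 none with
    | none => none
    | some b => some b.2
  else none

-- ===== PRECONDITION & SPEC =====
-- Pre_ excludes only inputs where Python A raises: a valid guard together with an empty
-- vetor (IndexError on `vetor[0]`); A returns on everything else.
def Pre_pesquisaNumeroSecreto (qtdeAlunos : Int) (numeroSecreto : Int) (vetor : List Int) : Prop :=
  (qtdeAlunos ≤ 10 ∧ 4 ≤ qtdeAlunos ∧ numeroSecreto ≤ 100 ∧ 1 ≤ numeroSecreto) → vetor ≠ []
instance (qtdeAlunos : Int) (numeroSecreto : Int) (vetor : List Int) : Decidable (Pre_pesquisaNumeroSecreto qtdeAlunos numeroSecreto vetor) := by unfold Pre_pesquisaNumeroSecreto; infer_instance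
def pvWitness_pesquisaNumeroSecreto : Int × Int × List Int := (5, 7, [3, 9, 7])

def Spec_pesquisaNumeroSecreto (qtdeAlunos : Int) (numeroSecreto : Int) (vetor : List Int) (out : Option Int) : Prop := out = pesquisaNumeroSecreto_alt qtdeAlunos numeroSecreto vetor
instance (qtdeAlunos : Int) (numeroSecreto : Int) (vetor : List Int) (out : Option Int) : Decidable (Spec_pesquisaNumeroSecreto qtdeAlunos numeroSecreto vetor out) := by unfold Spec_pesquisaNumeroSecreto; infer_instance

-- ===== CLAIM (what is proved, stated in full; the proofs are below) =====
def Claim_equal_pesquisaNumeroSecreto : Prop := ∀ (qtdeAlunos : Int) (numeroSecreto : Int) (vetor : List Int), Dom_pesquisaNumeroSecreto qtdeAlunos numeroSecreto vetor → Pre_pesquisaNumeroSecreto qtdeAlunos numeroSecreto vetor → Spec_pesquisaNumeroSecreto qtdeAlunos numeroSecreto vetor (pesquisaNumeroSecreto qtdeAlunos numeroSecreto vetor)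
-- ===== LEMMAS AND PROOFS =====
-- sm n l = (minimum of |v - n| over l, index of its first occurrence); the common spec
def sm (n : Int) : List Int → Int × Nat
  | [] => (0, 0)
  | [v] => (|v - n|, 0)
  | v :: vs => let p := sm n vs; if |v - n| ≤ p.1 then (|v - n|, 0) else (p.1, p.2 + 1)

lemma sm_nonneg (n : Int) (l : List Int) : 0 ≤ (sm n l).1 := by
  induction l with
  | nil => simp [sm]
  | cons v vs ih =>
    cases vs with
    | nil => simp [sm, abs_nonneg]
    | cons w t =>
      simp only [sm] at ih ⊢
      split <;> simp_all [abs_nonneg]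

lemma bLoop_some (n : Int) (l : List Int) : ∀ (p bd bp : Int),
    bLoop n l p (some (bd, bp)) =
      some (if l ≠ [] ∧ (sm n l).1 < bd then ((sm n l).1, p + ((sm n l).2 : Int)) else (bd, bp)) := by
  induction l with
  | nil => simp [bLoop]
  | cons v vs ih =>
    intro p bd bp
    cases vs with
    | nil =>
      simp only [bLoop, sm]
      split_ifs with h1 h2 h2 <;> simp_all
    | cons w t =>
      rw [bLoop]
      by_cases hd : |v - n| < bd
      · rw [if_pos hd, ih]
        simp only [sm]
        split_ifs with h1 h2 h3 h4 h5 <;> simp_all <;> omega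
      · rw [if_neg hd, ih]
        simp only [sm]
        split_ifs with h1 h2 h3 h4 h5 <;> simp_all <;> omega

lemma bLoop_none (n : Int) (l : List Int) (h : l ≠ []) (p : Int) :
    bLoop n l p none = some ((sm n l).1, p + ((sm n l).2 : Int)) := by
  cases l with
  | nil => exact absurd rfl h
  | cons v vs =>
    show bLoop n vs (p + 1) (some (|v - n|, p)) = _
    rw [bLoop_some]
    cases vs with
    | nil => simp [sm]
    | cons w t =>
      simp only [sm]
      split_ifs with h1 h2 h3 <;> simp_all <;> omega

lemma foldl_min_sm (n : Int) (l : List Int) : ∀ (a : Int),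
    (l.map (fun v => |v - n|)).foldl min a = if l = [] then a else min a (sm n l).1 := by
  induction l with
  | nil => simp
  | cons v vs ih =>
    intro a
    cases vs with
    | nil => simp [sm]
    | cons w t =>
      rw [List.map_cons, List.foldl_cons, ih]
      simp only [sm, if_neg (List.cons_ne_nil (α := Int) _ _)]
      split_ifs <;> omega

lemma index_min_sm (n : Int) (l : List Int) (h : l ≠ []) :
    PySem.List.index? (l.map (fun v => |v - n|)) (sm n l).1 = some (sm n l).2 := by
  induction l with
  | nil => exact absurd rfl h
  | cons v vs ih =>
    cases vs with
    | nil => simp [sm]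
    | cons w t =>
      by_cases h1 : |v - n| ≤ (sm n (w :: t)).1
      · have hsm : sm n (v :: w :: t) = (|v - n|, 0) := by simp [sm, h1]
        rw [hsm, List.map_cons]
        exact PySem.List.index?_cons_self _ _
      · have hsm : sm n (v :: w :: t) = ((sm n (w :: t)).1, (sm n (w :: t)).2 + 1) := by
          simp [sm, h1]
        have hne : |v - n| ≠ (sm n (w :: t)).1 := by omega
        rw [hsm, List.map_cons]
        rw [PySem.List.index?_cons_of_ne]
        · rw [ih (by simp)]
          rfl
        · exact hne

lemma scan_sm (n : Int) (l : List Int) (i : Nat) (h : scanA n l = some i) : sm n l = (0, i) := by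
  induction l generalizing i with
  | nil => simp [scanA] at h
  | cons v vs ih =>
    rw [scanA] at h
    by_cases hv : v = n
    · rw [if_pos hv] at h
      cases h
      cases vs with
      | nil => simp [sm, hv]
      | cons w t =>
        have := sm_nonneg n (w :: t)
        simp [sm, hv]
        omega
    · rw [if_neg hv] at h
      cases hj : scanA n vs with
      | none => simp [hj] at h
      | some j =>
        rw [hj] at h
        simp only [Option.map_some] at h
        have hsm := ih j hj
        have hvs : vs ≠ [] := by rintro rfl; simp [scanA] at hj
        cases vs with
        | nil => exact absurd rfl hvs
        | cons w t =>
          have habs : 0 < |v - n| := abs_pos.mpr (sub_ne_zero.mpr hv)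
          simp only [sm, hsm]
          rw [if_neg (by omega)]
          simp [Option.some.inj h]

lemma closest_eq (n : Int) (l : List Int) (h : l ≠ []) :
    closestA l n = some (((sm n l).2 : Int) + 1) := by
  have hmap : l.map (fun valor => |n - valor|) = l.map (fun v => |v - n|) :=
    List.map_congr_left (fun v _ => abs_sub_comm n v)
  cases l with
  | nil => exact absurd rfl h
  | cons v vs =>
    simp only [closestA, hmap]
    rw [List.map_cons, PySem.List.min?_id_cons]
    have hmin : (List.map (fun v => |v - n|) vs).foldl min (|v - n|) = (sm n (v :: vs)).1 := by
      rw [foldl_min_sm]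
      cases vs with
      | nil => simp [sm]
      | cons w t =>
        rw [if_neg (by simp)]
        simp only [sm]
        split_ifs with h1 <;> omega
    simp only [hmin]
    have hidx : PySem.List.index? (|v - n| :: List.map (fun v => |v - n|) vs) (sm n (v :: vs)).1
        = some (sm n (v :: vs)).2 := by
      simpa [List.map_cons] using index_min_sm n (v :: vs) (by simp)
    rw [hidx]

-- ===== VERDICT (by name: the statement is the Claim_ definition above) =====
theorem pesquisaNumeroSecreto_spec : Claim_equal_pesquisaNumeroSecreto := by
  intro q n l _ hpre
  unfold Spec_pesquisaNumeroSecreto pesquisaNumeroSecreto pesquisaNumeroSecreto_alt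
  by_cases hg : q ≤ 10 ∧ 4 ≤ q ∧ n ≤ 100 ∧ 1 ≤ n
  · have hl : l ≠ [] := hpre hg
    rw [if_pos hg, if_pos ⟨hg.2.1, hg.1, hg.2.2.2, hg.2.2.1⟩]
    rw [bLoop_none n l hl 1]
    cases l with
    | nil => exact absurd rfl hl
    | cons v vs =>
      cases hscan : scanA n (v :: vs) with
      | some i =>
        have := scan_sm n (v :: vs) i hscan
        simp [this, add_comm]
      | none =>
        rw [closest_eq n (v :: vs) hl]
        simp [add_comm]
  · rw [if_neg hg, if_neg (by tauto)]
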